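-- pv_equiv track=rewrite | github.com/Avicii4/LeetCode | Python/exam/Baidu3.py | ifhu
-- ===== SOURCE A (Python) =====
-- from collections import Counter
-- import copy
--
-- def can_form_four(cards):
--     if not cards:
--         return True
--     cccc = copy.deepcopy(cards)
--     for card, count in cccc.items():
--         if count >= 3:
--             cards[card] -= 3
--             if cards[card] == 0:
--                 del cards[card]
--             if can_form_four(cards):
--                 return True
--             cards[card] = count
--
--     sort_cards = sorted(cards.keys())
--     for i in range(len(sort_cards) - 2):
--         if sort_cards[i] + 1 in cards and sort_cards[i] + 2 in cards:
--             cards[sort_cards[i]] -= 1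
--             cards[sort_cards[i] + 1] -= 1
--             cards[sort_cards[i] + 2] -= 1
--
--             if cards[sort_cards[i]] == 0:
--                 del cards[sort_cards[i]]
--             if cards[sort_cards[i] + 1] == 0:
--                 del cards[sort_cards[i] + 1]
--             if cards[sort_cards[i] + 2] == 0:
--                 del cards[sort_cards[i] + 2]
--             if can_form_four(cards):
--                 return True
--
--             cards[sort_cards[i]] += 1
--             cards[sort_cards[i] + 1] += 1
--             cards[sort_cards[i] + 2] += 1
--     return False
--
-- def ifhu(cards):
--     cnt = Counter(cards)
--     ccc = copy.deepcopy(cnt)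
--     for card, count in ccc.items():
--         if count >= 2:
--             cnt[card] -= 2  # 先拿出来做对子
--             if cnt[card] == 0:
--                 del cnt[card]
--             if can_form_four(cnt):
--                 return True
--             cnt[card] += 2
--     return False
-- ===== SOURCE B (Python) =====
-- from collections import Counter
--
--
-- def _melds(cnt):
--     # Greedy over increasing values: at the current minimum value v with c
--     # copies left, exactly c % 3 runs (v, v+1, v+2) must start at v and the
--     # rest of the copies form triplets; three identical runs are
--     # interchangeable with three triplets, so this choice is complete.
--     for v in sorted(cnt):
--         c = cnt.get(v, 0)
--         if c == 0:
--             continue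
--         r = c % 3
--         if r:
--             if cnt.get(v + 1, 0) < r or cnt.get(v + 2, 0) < r:
--                 return False
--             cnt[v + 1] -= r
--             cnt[v + 2] -= r
--         cnt[v] = 0
--     return True
--
--
-- def ifhu(cards):
--     cnt = Counter(cards)
--     for p in cnt:
--         if cnt[p] >= 2:
--             c = dict(cnt)
--             c[p] -= 2
--             if c[p] == 0:
--                 del c[p]
--             if _melds(c):
--                 return True
--     return False
-- ===== Notes on version B (the rewrite author's own statement) =====
-- stated objective: faster
-- what changed: B replaces A's exponential backtracking (which tries every triplet and every run at each recursion level, with a dict copy per call) by a single greedy pass over the sorted distinct values for each candidate pair: at the current minimum value v with c copies, exactly c % 3 runs (v,v+1,v+2) must start, since three identical runs are interchangeable with three triplets.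
import Mathlib
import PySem

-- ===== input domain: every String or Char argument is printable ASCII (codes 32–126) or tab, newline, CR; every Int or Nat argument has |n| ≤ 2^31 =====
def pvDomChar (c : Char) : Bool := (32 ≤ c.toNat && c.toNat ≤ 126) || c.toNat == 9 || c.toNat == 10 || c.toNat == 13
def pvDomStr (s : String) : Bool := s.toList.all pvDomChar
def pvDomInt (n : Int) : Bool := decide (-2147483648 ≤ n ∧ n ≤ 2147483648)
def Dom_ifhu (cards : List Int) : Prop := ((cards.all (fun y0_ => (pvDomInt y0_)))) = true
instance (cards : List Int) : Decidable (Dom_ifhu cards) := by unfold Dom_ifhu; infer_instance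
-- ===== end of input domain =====

-- B replaces A's exponential backtracking with one greedy pass over the sorted values per pair
-- choice (three identical runs are interchangeable with three triplets, so at the minimum value
-- exactly count % 3 runs must start); an asymptotically smaller algorithm (objective: faster).

-- ===== PORT A =====
-- `if cards[k] == 0: del cards[k]` (shared by both ports)
def delIfZero (d : PySem.Dict Int Int) (k : Int) : PySem.Dict Int Int :=
  if d.getD k 0 == 0 then d.erase k else d

-- `fuel` only makes the Python recursion structural: each recursive call of can_form_four
-- removes 3 cards, so `cards.length + 1` at the top is never exhausted.
mutual
def canFormFour : Nat → PySem.Dict Int Int → Bool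
  | 0, _ => false
  | fuel+1, cards =>
    if cards.items.isEmpty then true
    else
      let res := tripleLoop fuel cards.items cards
      if res.1 then true
      else
        let cards1 := res.2
        let sortCards := PySem.List.sorted cards1.keys (fun x => x) false
        (runLoop fuel (sortCards.take (sortCards.length - 2)) cards1).1
  termination_by fuel _ => (fuel, 0)

-- `for card, count in cccc.items(): if count >= 3: …` (threads the mutated dict through)
def tripleLoop : Nat → List (Int × Int) → PySem.Dict Int Int → Bool × PySem.Dict Int Int
  | _, [], cards => (false, cards)
  | fuel, (card, count) :: rest, cards =>
    if 3 ≤ count then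
      let c1 := delIfZero (cards.modify card 0 (· - 3)) card
      if canFormFour fuel c1 then (true, c1)
      else tripleLoop fuel rest (c1.insert card count)
    else tripleLoop fuel rest cards
  termination_by fuel items _ => (fuel, items.length + 1)

-- `for i in range(len(sort_cards) - 2): …` (the caller passes the first len-2 sorted keys)
def runLoop : Nat → List Int → PySem.Dict Int Int → Bool × PySem.Dict Int Int
  | _, [], cards => (false, cards)
  | fuel, v :: vs, cards =>
    if cards.contains (v+1) && cards.contains (v+2) then
      let c1 := ((cards.modify v 0 (· - 1)).modify (v+1) 0 (· - 1)).modify (v+2) 0 (· - 1)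
      let c4 := delIfZero (delIfZero (delIfZero c1 v) (v+1)) (v+2)
      if canFormFour fuel c4 then (true, c4)
      else
        let c5 := ((c4.modify v 0 (· + 1)).modify (v+1) 0 (· + 1)).modify (v+2) 0 (· + 1)
        runLoop fuel vs c5
    else runLoop fuel vs cards
  termination_by fuel vs _ => (fuel, vs.length + 1)
end

-- `for card, count in ccc.items(): if count >= 2: …`
def pairLoop : Nat → List (Int × Int) → PySem.Dict Int Int → Bool
  | _, [], _ => false
  | fuel, (card, count) :: rest, cnt =>
    if 2 ≤ count then
      let c1 := delIfZero (cnt.modify card 0 (· - 2)) card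
      if canFormFour fuel c1 then true
      else pairLoop fuel rest (c1.modify card 0 (· + 2))
    else pairLoop fuel rest cnt

def ifhu (cards : List Int) : Bool :=
  let cnt := PySem.Dict.counter cards
  pairLoop (cards.length + 1) cnt.items cnt

-- ===== PORT B =====
-- greedy pass of Source B's _melds over the sorted values
def meldsGo : List Int → PySem.Dict Int Int → Bool
  | [], _ => true
  | v :: rest, cnt =>
    let c := cnt.getD v 0
    if c == 0 then meldsGo rest cnt
    else
      let r := PySem.Int.mod c 3
      if r != 0 then
        if cnt.getD (v+1) 0 < r || cnt.getD (v+2) 0 < r then false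
        else
          let cnt1 := (cnt.modify (v+1) 0 (· - r)).modify (v+2) 0 (· - r)
          meldsGo rest (cnt1.insert v 0)
      else meldsGo rest (cnt.insert v 0)

def melds (cnt : PySem.Dict Int Int) : Bool :=
  meldsGo (PySem.List.sorted cnt.keys (fun x => x) false) cnt

-- `for p in cnt: if cnt[p] >= 2: …` (works on a copy, so nothing to restore)
def pairLoopB : List Int → PySem.Dict Int Int → Bool
  | [], _ => false
  | p :: rest, cnt =>
    if 2 ≤ cnt.getD p 0 then
      let c := delIfZero (cnt.modify p 0 (· - 2)) p
      if melds c then true else pairLoopB rest cnt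
    else pairLoopB rest cnt

def ifhu_alt (cards : List Int) : Bool :=
  let cnt := PySem.Dict.counter cards
  pairLoopB cnt.keys cnt

-- ===== PRECONDITION & SPEC =====
def Spec_ifhu (cards : List Int) (out : Bool) : Prop := out = ifhu_alt cards
instance (cards : List Int) (out : Bool) : Decidable (Spec_ifhu cards out) := by unfold Spec_ifhu; infer_instance

-- ===== CLAIM (what is proved, stated in full; the proofs are below) =====
def Claim_equal_ifhu : Prop := ∀ (cards : List Int), Dom_ifhu cards → Spec_ifhu cards (ifhu cards)

-- ===== LEMMAS AND PROOFS =====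

-- the multiset of cards a count-dict represents
def toMul (d : PySem.Dict Int Int) : Multiset Int :=
  (d.items.map (fun p => Multiset.replicate p.2.toNat p.1)).sum

-- invariant of every dict A's search touches: unique keys, each with a positive count
def DInv (d : PySem.Dict Int Int) : Prop := d.keys.Nodup ∧ ∀ k ∈ d.keys, 0 < d.getD k 0

-- a meld: three of a kind, or a run of three consecutive values
inductive Meld where
  | triple : Int → Meld
  | run : Int → Meld
deriving DecidableEq, Repr

def Meld.mset : Meld → Multiset Int
  | .triple v => Multiset.replicate 3 v
  | .run v => {v, v+1, v+2}

-- the common specification: the multiset splits into melds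
def IsDecomp (m : Multiset Int) : Prop := ∃ M : Multiset Meld, (M.map Meld.mset).sum = m

theorem isDecomp_zero : IsDecomp 0 := ⟨0, rfl⟩

-- ---- Dict plumbing ----

theorem find?_filter_ne (l : List (Int × Int)) (k j : Int) (h : j ≠ k) :
    (l.filter (fun p => !(p.1 == k))).find? (fun p => p.1 == j) = l.find? (fun p => p.1 == j) := by
  induction l with
  | nil => rfl
  | cons p t ih =>
    by_cases hp : p.1 = k
    · simp [List.filter_cons, hp, List.find?_cons, Ne.symm h, ih]
    · by_cases hj : p.1 = j
      · simp [List.filter_cons, hp, List.find?_cons, hj, h]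
      · simp [List.filter_cons, hp, List.find?_cons, hj, ih]

theorem find?_filter_self (l : List (Int × Int)) (k : Int) :
    (l.filter (fun p => !(p.1 == k))).find? (fun p => p.1 == k) = none := by
  induction l with
  | nil => rfl
  | cons p t ih =>
    by_cases hp : p.1 = k
    · simp [List.filter_cons, hp, ih]
    · simp [List.filter_cons, hp, List.find?_cons, ih]

theorem getD_erase (d : PySem.Dict Int Int) (k j : Int) :
    (d.erase k).getD j 0 = if j = k then 0 else d.getD j 0 := by
  by_cases h : j = k
  · subst h
    rw [if_pos rfl, PySem.Dict.getD, PySem.Dict.get?,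
      (show (d.erase j).items = d.items.filter (fun p => !(p.1 == j)) from rfl),
      find?_filter_self d.items j]
    rfl
  · rw [if_neg h, PySem.Dict.getD, PySem.Dict.get?, PySem.Dict.getD, PySem.Dict.get?,
      (show (d.erase k).items = d.items.filter (fun p => !(p.1 == k)) from rfl),
      find?_filter_ne d.items k j h]

theorem keys_erase_sublist (d : PySem.Dict Int Int) (k : Int) :
    (d.erase k).keys.Sublist d.keys := by
  simpa [PySem.Dict.keys, PySem.Dict.erase] using (List.filter_sublist (l := d.items) (p := fun p => !(p.1 == k))).map Prod.fst

theorem nodup_keys_erase (d : PySem.Dict Int Int) (k : Int)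
    (h : d.keys.Nodup) : (d.erase k).keys.Nodup := h.sublist (keys_erase_sublist d k)

theorem mem_keys_erase (d : PySem.Dict Int Int) (k j : Int) :
    j ∈ (d.erase k).keys ↔ j ∈ d.keys ∧ j ≠ k := by
  constructor
  · intro hm
    rcases List.mem_map.mp hm with ⟨p, hp, rfl⟩
    rcases List.mem_filter.mp hp with ⟨hp1, hp2⟩
    exact ⟨List.mem_map_of_mem hp1, by simpa using hp2⟩
  · rintro ⟨hm, hne⟩
    rcases List.mem_map.mp hm with ⟨p, hp, rfl⟩
    exact List.mem_map_of_mem (List.mem_filter.mpr ⟨hp, by simpa using hne⟩)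

theorem nodup_keys_modify (d : PySem.Dict Int Int) (k : Int) (f : Int → Int)
    (h : d.keys.Nodup) : (d.modify k 0 f).keys.Nodup := by
  rw [PySem.Dict.modify]; exact PySem.Dict.nodup_keys_insert d k _ h

theorem mem_keys_modify (d : PySem.Dict Int Int) (k j : Int) (f : Int → Int) :
    j ∈ (d.modify k 0 f).keys ↔ j = k ∨ j ∈ d.keys := by
  rw [PySem.Dict.modify]; exact PySem.Dict.mem_keys_insert d k j _

theorem mem_keys_of_getD_ne (d : PySem.Dict Int Int) (k : Int)
    (h : d.getD k 0 ≠ 0) : k ∈ d.keys := by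
  by_contra hc
  rw [PySem.Dict.getD, (PySem.Dict.get?_eq_none_iff_not_mem_keys d k).mpr hc] at h
  simp at h


theorem countL_not_mem (l : List (Int × Int)) (v : Int) (h : v ∉ l.map Prod.fst) :
    ((l.map (fun p => Multiset.replicate p.2.toNat p.1)).sum).count v = 0 := by
  induction l with
  | nil => rfl
  | cons p t ih =>
    simp only [List.map_cons, List.mem_cons] at h
    push Not at h
    simp only [List.map_cons, List.sum_cons, Multiset.count_add, Multiset.count_replicate]
    rw [if_neg (fun e => h.1 e.symm), ih h.2]

theorem getD_mk_cons (p : Int × Int) (t : List (Int × Int)) (v : Int) :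
    (PySem.Dict.mk (p :: t) : PySem.Dict Int Int).getD v 0
      = if p.1 = v then p.2 else (PySem.Dict.mk t : PySem.Dict Int Int).getD v 0 := by
  rw [PySem.Dict.getD_eq_get?_getD, (show (p : Int × Int) = (p.1, p.2) from rfl), PySem.Dict.get?_mk_cons]
  by_cases hc : p.1 = v <;> simp [hc, PySem.Dict.getD_eq_get?_getD]

theorem count_toMul (d : PySem.Dict Int Int) (h : d.keys.Nodup) (v : Int) :
    (toMul d).count v = (d.getD v 0).toNat := by
  obtain ⟨l⟩ := d
  simp only [PySem.Dict.keys] at h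
  induction l with
  | nil => rfl
  | cons p t ih =>
    simp only [List.map_cons, List.nodup_cons] at h
    simp only [toMul, List.map_cons, List.sum_cons, Multiset.count_add, Multiset.count_replicate,
      getD_mk_cons]
    by_cases hv : p.1 = v
    · simp only [if_pos hv]
      rw [countL_not_mem t v (hv ▸ h.1)]; omega
    · simp only [if_neg hv, Nat.zero_add]
      simpa [toMul] using ih h.2

theorem toMul_counter (l : List Int) : toMul (PySem.Dict.counter l) = (l : Multiset Int) := by
  ext v
  rw [count_toMul _ (PySem.Dict.nodup_keys_counter l) v, PySem.Dict.getD_counter]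
  simp

theorem mset_le_sum {M : Multiset Meld} {ml : Meld} (h : ml ∈ M) :
    ml.mset ≤ (M.map Meld.mset).sum := by
  rw [← Multiset.cons_erase h, Multiset.map_cons, Multiset.sum_cons]
  exact Multiset.le_add_right _ _

-- sum over a replicate of melds
theorem sum_map_mset_replicate (n : Nat) (ml : Meld) :
    ((Multiset.replicate n ml).map Meld.mset).sum = n • ml.mset := by
  rw [Multiset.map_replicate, Multiset.sum_replicate]


theorem nsmul_run (n : Nat) (v : Int) :
    n • ({v, v+1, v+2} : Multiset Int)
      = Multiset.replicate n v + Multiset.replicate n (v+1) + Multiset.replicate n (v+2) := by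
  have : ({v, v+1, v+2} : Multiset Int) = {v} + ({v+1} + {v+2}) := by rfl
  rw [this, smul_add, smul_add]
  simp [Multiset.nsmul_singleton, add_assoc]

theorem sum_rep_triple (n : Nat) (v : Int) :
    ((Multiset.replicate n (Meld.triple v)).map Meld.mset).sum = Multiset.replicate (n*3) v := by
  rw [sum_map_mset_replicate]
  show n • Multiset.replicate 3 v = _
  rw [Multiset.nsmul_replicate]

theorem sum_rep_run (n : Nat) (v : Int) :
    ((Multiset.replicate n (Meld.run v)).map Meld.mset).sum
      = Multiset.replicate n v + Multiset.replicate n (v+1) + Multiset.replicate n (v+2) := by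
  rw [sum_map_mset_replicate]
  exact nsmul_run n v

-- counting copies of the minimum value inside a decomposition
theorem count_min_sum (v : Int) : ∀ (M : Multiset Meld), (∀ u : Int, Meld.run u ∈ M → v ≤ u) →
    ((M.map Meld.mset).sum).count v
      = 3 * M.count (Meld.triple v) + M.count (Meld.run v) := by
  intro M
  induction M using Multiset.induction_on with
  | empty => simp
  | cons ml M ih =>
    intro h
    have hM : ∀ u : Int, Meld.run u ∈ M → v ≤ u := fun u hu => h u (Multiset.mem_cons_of_mem hu)
    simp only [Multiset.map_cons, Multiset.sum_cons, Multiset.count_add, Multiset.count_cons,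
      ih hM]
    cases ml with
    | triple u =>
      by_cases hu : u = v
      · subst hu; simp [Meld.mset, Multiset.count_replicate]; ring
      · simp [Meld.mset, Multiset.count_replicate, hu, Ne.symm hu]
    | run u =>
      have hvu : v ≤ u := h u (Multiset.mem_cons_self _ _)
      by_cases hu : u = v
      · subst hu
        have h1 : Multiset.count u ({u, u+1, u+2} : Multiset Int) = 1 := by
          rw [show ({u, u+1, u+2} : Multiset Int) = u ::ₘ {u+1, u+2} from rfl]
          rw [Multiset.count_cons_self]
          have : Multiset.count u ({u+1, u+2} : Multiset Int) = 0 := by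
            rw [Multiset.count_eq_zero]
            intro hmem
            rcases (by simpa using hmem : u = u + 1 ∨ u = u + 2) with h | h <;> omega
          omega
        simp [Meld.mset, h1]
        ring
      · have hlt : v < u := lt_of_le_of_ne hvu (Ne.symm hu)
        have : Multiset.count v ({u, u+1, u+2} : Multiset Int) = 0 := by
          simp [Multiset.count_eq_zero]
          omega
        simp [Meld.mset, this, hu]
        split_ifs with h1 <;> simp_all

theorem decomp_min (m : Multiset Int) (v : Int) (hv : v ∈ m) (hmin : ∀ x ∈ m, v ≤ x) :
    IsDecomp m ↔ (m.count v % 3 ≤ m.count (v+1) ∧ m.count v % 3 ≤ m.count (v+2) ∧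
      IsDecomp (m - (Multiset.replicate (m.count v) v + Multiset.replicate (m.count v % 3) (v+1)
        + Multiset.replicate (m.count v % 3) (v+2)))) := by
  set c := m.count v with hc
  set r := c % 3 with hr
  set X : Multiset Int := Multiset.replicate c v + Multiset.replicate r (v+1)
      + Multiset.replicate r (v+2) with hX
  have hcountX : ∀ x : Int, X.count x = (if x = v then c else 0) + (if x = v+1 then r else 0)
      + (if x = v+2 then r else 0) := by
    intro x
    simp [hX, Multiset.count_replicate]
    split_ifs <;> omega
  constructor
  · rintro ⟨M, hsum⟩
    have hrun : ∀ u : Int, Meld.run u ∈ M → v ≤ u := by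
      intro u hu
      refine hmin u (Multiset.mem_of_le (hsum ▸ mset_le_sum hu) ?_)
      simp [Meld.mset]
    have hcnt : c = 3 * M.count (Meld.triple v) + M.count (Meld.run v) := by
      rw [hc, ← hsum, count_min_sum v M hrun]
    set M₂ := M.filter (fun ml => ¬ (ml = Meld.triple v ∨ ml = Meld.run v)) with hM₂
    have hMsplit : M = Multiset.replicate (M.count (Meld.triple v)) (Meld.triple v)
        + Multiset.replicate (M.count (Meld.run v)) (Meld.run v) + M₂ := by
      ext ml
      simp only [Multiset.count_add, Multiset.count_replicate, hM₂, Multiset.count_filter]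
      by_cases h1 : ml = Meld.triple v
      · subst h1; simp
      · by_cases h2 : ml = Meld.run v
        · subst h2; simp [h1]
        · simp [h1, h2]
          exact ⟨fun e => absurd e.symm h1, fun e => absurd e.symm h2⟩
    have hrun2 : ∀ u : Int, Meld.run u ∈ M₂ → v ≤ u := fun u hu =>
      hrun u (Multiset.mem_of_le (Multiset.filter_le _ M) hu)
    set S₂ := (M₂.map Meld.mset).sum with hS₂
    have hS₂v : S₂.count v = 0 := by
      rw [hS₂, count_min_sum v M₂ hrun2]
      have e1 : M₂.count (Meld.triple v) = 0 := by
        simp [hM₂, Multiset.count_filter]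
      have e2 : M₂.count (Meld.run v) = 0 := by
        simp [hM₂, Multiset.count_filter]
      omega
    have hmE : ∀ x : Int, m.count x
        = (if x = v then 3 * M.count (Meld.triple v) else 0)
          + (if x = v then M.count (Meld.run v) else 0)
          + (if x = v+1 then M.count (Meld.run v) else 0)
          + (if x = v+2 then M.count (Meld.run v) else 0) + S₂.count x := by
      intro x
      conv_lhs => rw [← hsum, hMsplit]
      simp only [Multiset.map_add, Multiset.sum_add, sum_rep_triple, sum_rep_run]
      simp only [Multiset.count_add, Multiset.count_replicate, ← hS₂]
      split_ifs <;> omega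
    have hrk : r = M.count (Meld.run v) % 3 := by omega
    have hrle : r ≤ M.count (Meld.run v) := by omega
    have hdvd : 3 ∣ (M.count (Meld.run v) - r) := by omega
    refine ⟨?_, ?_, ?_⟩
    · have := hmE (v+1)
      have hne : ¬ ((v:Int)+1 = v) := by omega
      have hne2 : ¬ ((v:Int)+1 = v+2) := by omega
      rw [if_neg hne, if_neg hne, if_pos rfl, if_neg hne2] at this
      omega
    · have := hmE (v+2)
      have hne : ¬ ((v:Int)+2 = v) := by omega
      have hne2 : ¬ ((v:Int)+2 = v+1) := by omega
      rw [if_neg hne, if_neg hne, if_neg hne2, if_pos rfl] at this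
      omega
    · set k := M.count (Meld.run v) with hk
      set Y : Multiset Int := Multiset.replicate (k-r) (v+1) + Multiset.replicate (k-r) (v+2) + S₂ with hY
      have hmXY : m = X + Y := by
        ext x
        rw [hmE x, hY]
        simp only [Multiset.count_add, Multiset.count_replicate, hcountX]
        split_ifs <;> omega
      rw [hmXY, add_tsub_cancel_left]
      refine ⟨Multiset.replicate ((k-r)/3) (Meld.triple (v+1))
        + Multiset.replicate ((k-r)/3) (Meld.triple (v+2)) + M₂, ?_⟩
      simp only [Multiset.map_add, Multiset.sum_add, sum_rep_triple, ← hS₂]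
      rw [Nat.div_mul_cancel hdvd, hY]
  · rintro ⟨h1, h2, M', hsum'⟩
    have hXle : X ≤ m := by
      rw [Multiset.le_iff_count]
      intro x
      rw [hcountX x]
      by_cases e1 : x = v
      · subst e1; rw [if_pos rfl, if_neg (by omega), if_neg (by omega)]; omega
      · by_cases e2 : x = v+1
        · subst e2; rw [if_neg (by omega), if_pos rfl, if_neg (by omega)]; omega
        · by_cases e3 : x = v+2
          · subst e3; rw [if_neg (by omega), if_neg (by omega), if_pos rfl]; omega
          · rw [if_neg e1, if_neg e2, if_neg e3]; omega
    have hXdec : IsDecomp X := by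
      refine ⟨Multiset.replicate r (Meld.run v) + Multiset.replicate ((c-r)/3) (Meld.triple v), ?_⟩
      simp only [Multiset.map_add, Multiset.sum_add, sum_rep_triple, sum_rep_run]
      have h3 : 3 ∣ (c - r) := by omega
      rw [Nat.div_mul_cancel h3]
      ext x
      rw [hcountX x]
      simp only [Multiset.count_add, Multiset.count_replicate]
      split_ifs <;> omega
    obtain ⟨MX, hMX⟩ := hXdec
    refine ⟨MX + M', ?_⟩
    rw [Multiset.map_add, Multiset.sum_add, hMX, hsum']
    exact add_tsub_cancel_of_le hXle

theorem isDecomp_of_le_of_sub {x m : Multiset Int} (hx : x ≤ m)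
    (hdx : IsDecomp x) (hds : IsDecomp (m - x)) : IsDecomp m := by
  obtain ⟨M1, h1⟩ := hdx
  obtain ⟨M2, h2⟩ := hds
  exact ⟨M1 + M2, by rw [Multiset.map_add, Multiset.sum_add, h1, h2, add_tsub_cancel_of_le hx]⟩


-- ---- toolkit over DInv / toMul ----
theorem contains_iff_pos (d : PySem.Dict Int Int) (hI : DInv d) (k : Int) :
    d.contains k = true ↔ 0 < d.getD k 0 := by
  rw [PySem.Dict.contains_iff_mem_keys]
  constructor
  · exact hI.2 k
  · intro hpos
    exact mem_keys_of_getD_ne d k (by omega)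

theorem mem_toMul_iff (d : PySem.Dict Int Int) (h : d.keys.Nodup) (x : Int) :
    x ∈ toMul d ↔ 0 < d.getD x 0 := by
  rw [← Multiset.count_pos, count_toMul d h x]
  omega

theorem toMul_eq_of_getD (d d' : PySem.Dict Int Int) (h : d.keys.Nodup) (h' : d'.keys.Nodup)
    (he : ∀ j, d.getD j 0 = d'.getD j 0) : toMul d = toMul d' := by
  ext x
  rw [count_toMul d h x, count_toMul d' h' x, he x]

theorem getD_delIfZero (d : PySem.Dict Int Int) (k j : Int) :
    (delIfZero d k).getD j 0 = d.getD j 0 := by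
  rw [delIfZero]
  split_ifs with hz
  · rw [getD_erase]
    split_ifs with hj
    · subst hj
      simp only [beq_iff_eq] at hz
      omega
    · rfl
  · rfl

theorem nodup_keys_delIfZero (d : PySem.Dict Int Int) (k : Int) (h : d.keys.Nodup) :
    (delIfZero d k).keys.Nodup := by
  rw [delIfZero]; split_ifs
  · exact nodup_keys_erase d k h
  · exact h

theorem mem_keys_delIfZero (d : PySem.Dict Int Int) (k j : Int) :
    j ∈ (delIfZero d k).keys ↔ j ∈ d.keys ∧ ¬(j = k ∧ d.getD k 0 = 0) := by
  rw [delIfZero]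
  split_ifs with hz
  · rw [mem_keys_erase]
    simp only [beq_iff_eq] at hz
    constructor
    · rintro ⟨h1, h2⟩; exact ⟨h1, fun hc => h2 hc.1⟩
    · rintro ⟨h1, h2⟩; exact ⟨h1, fun hc => h2 ⟨hc, hz⟩⟩
  · simp only [beq_iff_eq] at hz
    constructor
    · intro h1; exact ⟨h1, fun hc => hz hc.2⟩
    · exact fun h1 => h1.1

-- the site `d[key] -= amt; if d[key] == 0: del d[key]`
theorem getD_subDel (d : PySem.Dict Int Int) (key amt j : Int) :
    (delIfZero (d.modify key 0 (· - amt)) key).getD j 0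
      = if j = key then d.getD key 0 - amt else d.getD j 0 := by
  rw [getD_delIfZero, PySem.Dict.getD_modify]

theorem dinv_subDel (d : PySem.Dict Int Int) (key amt : Int) (hI : DInv d)
    (hge : amt ≤ d.getD key 0) : DInv (delIfZero (d.modify key 0 (· - amt)) key) := by
  refine ⟨nodup_keys_delIfZero _ _ (nodup_keys_modify d key _ hI.1), ?_⟩
  intro k hk
  rw [getD_subDel]
  rcases (mem_keys_delIfZero _ _ _).mp hk with ⟨hk1, hk2⟩
  by_cases hkey : k = key
  · subst hkey
    rw [if_pos rfl]
    rw [PySem.Dict.getD_modify, if_pos rfl] at hk2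
    omega
  · rw [if_neg hkey]
    have hmem : k ∈ d.keys := ((mem_keys_modify d key k _).mp hk1).resolve_left hkey
    exact hI.2 k hmem

theorem toMul_subDel (d : PySem.Dict Int Int) (key amt : Int) (hI : DInv d)
    (hamt : 0 ≤ amt) (hge : amt ≤ d.getD key 0) :
    toMul (delIfZero (d.modify key 0 (· - amt)) key)
      = toMul d - Multiset.replicate amt.toNat key := by
  ext x
  rw [count_toMul _ (nodup_keys_delIfZero _ _ (nodup_keys_modify d key _ hI.1)) x,
    Multiset.count_sub, count_toMul d hI.1 x, getD_subDel]
  by_cases h : x = key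
  · subst h
    simp only [if_pos rfl, Multiset.count_replicate]
    simp
    omega
  · simp only [if_neg h, Multiset.count_replicate]
    rw [if_neg (fun e => h (by omega))]
    omega


theorem getD_of_not_mem_keys (d : PySem.Dict Int Int) (j : Int) (h : j ∉ d.keys) :
    d.getD j 0 = 0 := by
  rw [PySem.Dict.getD, (PySem.Dict.get?_eq_none_iff_not_mem_keys d j).mpr h]
  rfl

theorem getD_nonneg (d : PySem.Dict Int Int) (hI : DInv d) (j : Int) : 0 ≤ d.getD j 0 := by
  by_cases h : j ∈ d.keys
  · exact le_of_lt (hI.2 j h)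
  · rw [getD_of_not_mem_keys d j h]

-- the run site: `cards[v] -= 1` three times, then the three conditional deletes
theorem getD_runDec (d : PySem.Dict Int Int) (v j : Int) :
    (delIfZero (delIfZero (delIfZero
        (((d.modify v 0 (· - 1)).modify (v+1) 0 (· - 1)).modify (v+2) 0 (· - 1)) v) (v+1)) (v+2)).getD j 0
      = if j = v ∨ j = v+1 ∨ j = v+2 then d.getD j 0 - 1 else d.getD j 0 := by
  simp only [getD_delIfZero, PySem.Dict.getD_modify]
  split_ifs <;> subst_vars <;> omega

theorem getD_runMod (d : PySem.Dict Int Int) (v j : Int) :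
    (((d.modify v 0 (· - 1)).modify (v+1) 0 (· - 1)).modify (v+2) 0 (· - 1)).getD j 0
      = if j = v ∨ j = v+1 ∨ j = v+2 then d.getD j 0 - 1 else d.getD j 0 := by
  simp only [PySem.Dict.getD_modify]
  by_cases e1 : v = j
  · subst e1; split_ifs <;> omega
  · by_cases e2 : v+1 = j
    · subst e2; split_ifs <;> omega
    · by_cases e3 : v+2 = j
      · subst e3; split_ifs <;> omega
      · split_ifs <;> omega

theorem dinv_runDec (d : PySem.Dict Int Int) (v : Int) (hI : DInv d)
    (h1 : 0 < d.getD v 0) (h2 : 0 < d.getD (v+1) 0) (h3 : 0 < d.getD (v+2) 0) :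
    DInv (delIfZero (delIfZero (delIfZero
        (((d.modify v 0 (· - 1)).modify (v+1) 0 (· - 1)).modify (v+2) 0 (· - 1)) v) (v+1)) (v+2)) := by
  have hnd : (((d.modify v 0 (· - 1)).modify (v+1) 0 (· - 1)).modify (v+2) 0 (· - 1)).keys.Nodup :=
    nodup_keys_modify _ _ _ (nodup_keys_modify _ _ _ (nodup_keys_modify _ _ _ hI.1))
  refine ⟨nodup_keys_delIfZero _ _ (nodup_keys_delIfZero _ _ (nodup_keys_delIfZero _ _ hnd)), ?_⟩
  intro k hk
  rw [getD_runDec]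
  rcases (mem_keys_delIfZero _ _ _).mp hk with ⟨hk', hc3⟩
  rcases (mem_keys_delIfZero _ _ _).mp hk' with ⟨hk'', hc2⟩
  rcases (mem_keys_delIfZero _ _ _).mp hk'' with ⟨hk1, hc1⟩
  rw [getD_delIfZero, getD_delIfZero, getD_runMod, if_pos (show (v:Int)+2 = v ∨ (v:Int)+2 = v+1 ∨ (v:Int)+2 = v+2 from Or.inr (Or.inr rfl))] at hc3
  rw [getD_delIfZero, getD_runMod, if_pos (show (v:Int)+1 = v ∨ (v:Int)+1 = v+1 ∨ (v:Int)+1 = v+2 from Or.inr (Or.inl rfl))] at hc2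
  rw [getD_runMod, if_pos (show (v:Int) = v ∨ (v:Int) = v+1 ∨ (v:Int) = v+2 from Or.inl rfl)] at hc1
  by_cases e1 : v = k
  · subst e1
    rw [if_pos (Or.inl rfl)]
    have : ¬ (d.getD v 0 - 1 = 0) := fun h0 => hc1 ⟨rfl, h0⟩
    omega
  · by_cases e2 : v+1 = k
    · subst e2
      rw [if_pos (Or.inr (Or.inl rfl))]
      have : ¬ (d.getD (v+1) 0 - 1 = 0) := fun h0 => hc2 ⟨rfl, h0⟩
      omega
    · by_cases e3 : v+2 = k
      · subst e3
        rw [if_pos (Or.inr (Or.inr rfl))]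
        have : ¬ (d.getD (v+2) 0 - 1 = 0) := fun h0 => hc3 ⟨rfl, h0⟩
        omega
      · rw [if_neg (by omega)]
        have hmem : k ∈ d.keys := by
          rcases (mem_keys_modify _ _ _ _).mp hk1 with h | m2
          · exact absurd h (fun e => e3 e.symm)
          rcases (mem_keys_modify _ _ _ _).mp m2 with h | m1
          · exact absurd h (fun e => e2 e.symm)
          rcases (mem_keys_modify _ _ _ _).mp m1 with h | m0
          · exact absurd h (fun e => e1 e.symm)
          · exact m0
        exact hI.2 k hmem

theorem toMul_runDec (d : PySem.Dict Int Int) (v : Int) (hI : DInv d)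
    (h1 : 0 < d.getD v 0) (h2 : 0 < d.getD (v+1) 0) (h3 : 0 < d.getD (v+2) 0) :
    toMul (delIfZero (delIfZero (delIfZero
        (((d.modify v 0 (· - 1)).modify (v+1) 0 (· - 1)).modify (v+2) 0 (· - 1)) v) (v+1)) (v+2))
      = toMul d - (v ::ₘ (v+1) ::ₘ {v+2}) := by
  have hI' := dinv_runDec d v hI h1 h2 h3
  ext x
  rw [count_toMul _ hI'.1 x, Multiset.count_sub, count_toMul d hI.1 x, getD_runDec]
  have hcnt : Multiset.count x (v ::ₘ (v+1) ::ₘ ({v+2} : Multiset Int))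
      = (if x = v then 1 else 0) + (if x = v+1 then 1 else 0) + (if x = v+2 then 1 else 0) := by
    simp only [Multiset.count_cons, Multiset.count_singleton]
    split_ifs <;> omega
  rw [hcnt]
  by_cases e1 : v = x
  · subst e1
    rw [if_pos (Or.inl rfl), if_pos rfl, if_neg (by omega), if_neg (by omega)]
    omega
  · by_cases e2 : v+1 = x
    · subst e2
      rw [if_pos (Or.inr (Or.inl rfl)), if_neg (by omega), if_pos rfl, if_neg (by omega)]
      omega
    · by_cases e3 : v+2 = x
      · subst e3
        rw [if_pos (Or.inr (Or.inr rfl)), if_neg (by omega), if_neg (by omega), if_pos rfl]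
        omega
      · rw [if_neg (by omega), if_neg (by omega), if_neg (by omega), if_neg (by omega)]
        omega

theorem getD_runRestore (d : PySem.Dict Int Int) (v j : Int) :
    ((((delIfZero (delIfZero (delIfZero
        (((d.modify v 0 (· - 1)).modify (v+1) 0 (· - 1)).modify (v+2) 0 (· - 1)) v) (v+1)) (v+2)).modify
          v 0 (· + 1)).modify (v+1) 0 (· + 1)).modify (v+2) 0 (· + 1)).getD j 0 = d.getD j 0 := by
  simp only [PySem.Dict.getD_modify, getD_delIfZero]
  by_cases e1 : v = j
  · subst e1; split_ifs <;> omega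
  · by_cases e2 : v+1 = j
    · subst e2; split_ifs <;> omega
    · by_cases e3 : v+2 = j
      · subst e3; split_ifs <;> omega
      · split_ifs <;> omega

theorem dinv_runRestore (d : PySem.Dict Int Int) (v : Int) (hI : DInv d)
    (h1 : 0 < d.getD v 0) (h2 : 0 < d.getD (v+1) 0) (h3 : 0 < d.getD (v+2) 0) :
    DInv ((((delIfZero (delIfZero (delIfZero
        (((d.modify v 0 (· - 1)).modify (v+1) 0 (· - 1)).modify (v+2) 0 (· - 1)) v) (v+1)) (v+2)).modify
          v 0 (· + 1)).modify (v+1) 0 (· + 1)).modify (v+2) 0 (· + 1)) := by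
  have hI' := dinv_runDec d v hI h1 h2 h3
  refine ⟨nodup_keys_modify _ _ _ (nodup_keys_modify _ _ _ (nodup_keys_modify _ _ _ hI'.1)), ?_⟩
  intro k hk
  rw [getD_runRestore]
  rcases (mem_keys_modify _ _ _ _).mp hk with h | m2
  · subst h; exact h3
  rcases (mem_keys_modify _ _ _ _).mp m2 with h | m1
  · subst h; exact h2
  rcases (mem_keys_modify _ _ _ _).mp m1 with h | m0
  · subst h; exact h1
  · have := hI'.2 k m0
    rw [getD_runDec] at this
    have hd := getD_nonneg d hI k
    by_cases hor : k = v ∨ k = v+1 ∨ k = v+2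
    · rw [if_pos hor] at this; omega
    · rw [if_neg hor] at this; omega

theorem pairwise_lt_of_sorted_nodup (l : List Int) (h1 : l.Pairwise (· ≤ ·)) (h2 : l.Nodup) :
    l.Pairwise (· < ·) := by
  have := h1.and h2
  exact this.imp (fun h => lt_of_le_of_ne h.1 h.2)

theorem mem_take_of_sorted (l : List Int) (hl : l.Pairwise (· < ·)) (v : Int)
    (m1 : v ∈ l) (m2 : v+1 ∈ l) (m3 : v+2 ∈ l) : v ∈ l.take (l.length - 2) := by
  have hsplit : l = l.take (l.length - 2) ++ l.drop (l.length - 2) := (List.take_append_drop _ l).symm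
  have hpw : ∀ a ∈ l.take (l.length - 2), ∀ b ∈ l.drop (l.length - 2), a < b := by
    intro a ha b hb
    have := hsplit ▸ hl
    exact (List.pairwise_append.mp this).2.2 a ha b hb
  by_contra hvt
  have hnd : l.Nodup := hl.nodup
  have hvd : v ∈ l.drop (l.length - 2) := by
    rcases List.mem_append.mp (hsplit ▸ m1) with h | h
    · exact absurd h hvt
    · exact h
  have h1d : v+1 ∈ l.drop (l.length - 2) := by
    rcases List.mem_append.mp (hsplit ▸ m2) with h | h
    · exact absurd (hpw _ h _ hvd) (by omega)
    · exact h
  have h2d : v+2 ∈ l.drop (l.length - 2) := by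
    rcases List.mem_append.mp (hsplit ▸ m3) with h | h
    · exact absurd (hpw _ h _ hvd) (by omega)
    · exact h
  have hsub : [v, v+1, v+2] ⊆ l.drop (l.length - 2) := by
    intro x hx
    simp only [List.mem_cons, List.mem_singleton, List.not_mem_nil, or_false] at hx
    rcases hx with h | h | h
    · rw [h]; exact hvd
    · rw [h]; exact h1d
    · rw [h]; exact h2d
  have hnd3 : ([v, v+1, v+2] : List Int).Nodup := by
    simp
  have hlen := (List.subperm_of_subset hnd3 hsub).length_le
  have : (l.drop (l.length - 2)).length ≤ 2 := by
    rw [List.length_drop]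
    omega
  simp at hlen
  omega

-- ===== A-side =====
theorem toMul_nonzero (d : PySem.Dict Int Int) (hI : DInv d) (h : d.items ≠ []) :
    toMul d ≠ 0 := by
  obtain ⟨p, hp⟩ := List.exists_mem_of_ne_nil d.items h
  have hk : p.1 ∈ d.keys := List.mem_map_of_mem hp
  have hpos := hI.2 p.1 hk
  intro h0
  have := count_toMul d hI.1 p.1
  rw [h0] at this
  simp at this
  omega

theorem isDecomp_triple_single (v : Int) : IsDecomp (Multiset.replicate 3 v) :=
  ⟨{Meld.triple v}, by simp [Meld.mset]⟩

theorem isDecomp_run_single (v : Int) : IsDecomp (v ::ₘ (v+1) ::ₘ {v+2}) :=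
  ⟨{Meld.run v}, by simp [Meld.mset]⟩

theorem replicate_le_toMul (d : PySem.Dict Int Int) (hI : DInv d) (v : Int) (n : Nat)
    (h : (n : Int) ≤ d.getD v 0) : Multiset.replicate n v ≤ toMul d := by
  rw [Multiset.le_iff_count]
  intro a
  rw [Multiset.count_replicate, count_toMul d hI.1 a]
  split_ifs with ha
  · subst ha; omega
  · omega

theorem run_le_toMul (d : PySem.Dict Int Int) (hI : DInv d) (v : Int)
    (h1 : 0 < d.getD v 0) (h2 : 0 < d.getD (v+1) 0) (h3 : 0 < d.getD (v+2) 0) :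
    (v ::ₘ (v+1) ::ₘ ({v+2} : Multiset Int)) ≤ toMul d := by
  rw [Multiset.le_iff_count]
  intro a
  rw [count_toMul d hI.1 a]
  simp only [Multiset.count_cons, Multiset.count_singleton]
  by_cases e1 : v = a
  · subst e1
    rw [if_neg (by omega), if_neg (by omega), if_pos rfl]
    omega
  · by_cases e2 : v+1 = a
    · subst e2
      rw [if_neg (by omega), if_pos rfl, if_neg (by omega)]
      omega
    · by_cases e3 : v+2 = a
      · subst e3
        rw [if_pos rfl, if_neg (by omega), if_neg (by omega)]
        omega
      · rw [if_neg (by omega), if_neg (by omega), if_neg (by omega)]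
        omega

-- inversion: a nonempty decomposable multiset yields a first meld
theorem isDecomp_inversion (m : Multiset Int) (hm : m ≠ 0) (hd : IsDecomp m) :
    (∃ v, 3 ≤ m.count v ∧ IsDecomp (m - Multiset.replicate 3 v)) ∨
    (∃ v, v ∈ m ∧ (v+1) ∈ m ∧ (v+2) ∈ m ∧ IsDecomp (m - (v ::ₘ (v+1) ::ₘ {v+2}))) := by
  obtain ⟨M, hsum⟩ := hd
  have hM : M ≠ 0 := by rintro rfl; simp at hsum; exact hm hsum.symm
  obtain ⟨ml, hml⟩ := Multiset.exists_mem_of_ne_zero hM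
  have hsplit : m = ml.mset + ((M.erase ml).map Meld.mset).sum := by
    conv_lhs => rw [← hsum, ← Multiset.cons_erase hml]
    rw [Multiset.map_cons, Multiset.sum_cons]
  have hrest : IsDecomp (m - ml.mset) := by
    rw [hsplit, add_tsub_cancel_left]
    exact ⟨M.erase ml, rfl⟩
  cases ml with
  | triple v =>
    left
    refine ⟨v, ?_, hrest⟩
    calc (3:Nat) = Multiset.count v (Multiset.replicate 3 v) := by simp
    _ ≤ m.count v := Multiset.count_le_of_le v (by rw [hsplit]; exact Multiset.le_add_right _ _)
  | run v =>
    right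
    have hle : (v ::ₘ (v+1) ::ₘ ({v+2} : Multiset Int)) ≤ m := by
      rw [hsplit]; exact Multiset.le_add_right _ _
    refine ⟨v, ?_, ?_, ?_, hrest⟩
    · exact Multiset.mem_of_le hle (by simp)
    · exact Multiset.mem_of_le hle (by simp)
    · exact Multiset.mem_of_le hle (by simp)

theorem canFF_spec : ∀ (fuel : Nat) (d : PySem.Dict Int Int), DInv d →
    (toMul d).card < fuel → (canFormFour fuel d = true ↔ IsDecomp (toMul d)) := by
  intro fuel
  induction fuel with
  | zero => intro d _ h; exact absurd h (by omega)
  | succ f ih =>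
    intro d hI hcard
    have tripleSpec : ∀ (items : List (Int × Int)) (cards : PySem.Dict Int Int),
        DInv cards → (∀ j, cards.getD j 0 = d.getD j 0) →
        (∀ p ∈ items, cards.getD p.1 0 = p.2) →
        (((tripleLoop f items cards).1 = true ↔
           ∃ p, p ∈ items ∧ 3 ≤ p.2 ∧ IsDecomp (toMul d - Multiset.replicate 3 p.1))
         ∧ ((tripleLoop f items cards).1 = false →
             DInv (tripleLoop f items cards).2 ∧ ∀ j, (tripleLoop f items cards).2.getD j 0 = d.getD j 0)) := by
      intro items
      induction items with
      | nil =>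
        intro cards hci hcf _
        simp only [tripleLoop]
        exact ⟨by simp, fun _ => ⟨hci, hcf⟩⟩
      | cons hd rest IH =>
        intro cards hci hcf hit
        obtain ⟨card, count⟩ := hd
        have hmcards : toMul cards = toMul d := toMul_eq_of_getD cards d hci.1 hI.1 hcf
        by_cases hc3 : 3 ≤ count
        · have hcv : cards.getD card 0 = count := hit (card, count) (List.mem_cons_self)
          have hdv : d.getD card 0 = count := by rw [← hcf card, hcv]
          set c1 := delIfZero (cards.modify card 0 (fun c => c - 3)) card with hc1def
          have hIc1 : DInv c1 := dinv_subDel cards card 3 hci (by omega)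
          have hcf1 : ∀ j, c1.getD j 0 = if j = card then d.getD card 0 - 3 else d.getD j 0 := by
            intro j
            rw [hc1def, getD_subDel]
            split_ifs with h
            · rw [hcf card]
            · rw [hcf j]
          have hrep_le : Multiset.replicate 3 card ≤ toMul d :=
            replicate_le_toMul d hI card 3 (by omega)
          have hm1 : toMul c1 = toMul d - Multiset.replicate 3 card := by
            rw [hc1def, toMul_subDel cards card 3 hci (by omega) (by omega), hmcards]
            rfl
          have hcard1 : (toMul c1).card < f := by
            rw [hm1, Multiset.card_sub hrep_le]
            have h3le := Multiset.card_le_card hrep_le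
            simp only [Multiset.card_replicate] at h3le ⊢
            omega
          have ihc1 := ih c1 hIc1 hcard1
          simp only [tripleLoop, if_pos hc3]
          by_cases hrec : canFormFour f c1 = true
          · rw [if_pos hrec]
            constructor
            · constructor
              · intro _
                exact ⟨(card, count), List.mem_cons_self, hc3, hm1 ▸ ihc1.mp hrec⟩
              · intro _; rfl
            · intro h; cases h
          · rw [if_neg hrec]
            have hIr : DInv (c1.insert card count) := by
              refine ⟨PySem.Dict.nodup_keys_insert c1 card count hIc1.1, ?_⟩
              intro k hk
              rw [PySem.Dict.getD_insert]
              split_ifs with hkc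
              · omega
              · rcases (PySem.Dict.mem_keys_insert c1 card k count).mp hk with h | h
                · exact absurd h hkc
                · exact hIc1.2 k h
            have hcfr : ∀ j, (c1.insert card count).getD j 0 = d.getD j 0 := by
              intro j
              rw [PySem.Dict.getD_insert]
              split_ifs with h
              · subst h; omega
              · rw [hcf1 j, if_neg h]
            have IHrest := IH (c1.insert card count) hIr hcfr
              (fun p hp => by
                rw [hcfr p.1, ← hcf p.1]
                exact hit p (List.mem_cons_of_mem _ hp))
            refine ⟨?_, IHrest.2⟩
            rw [IHrest.1, List.exists_mem_cons_iff]
            constructor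
            · exact Or.inr
            · rintro (⟨_, hdec⟩ | h)
              · exact absurd (ihc1.mpr (hm1 ▸ hdec)) hrec
              · exact h
        · simp only [tripleLoop, if_neg hc3]
          have IHrest := IH cards hci hcf (fun p hp => hit p (List.mem_cons_of_mem _ hp))
          refine ⟨?_, IHrest.2⟩
          rw [IHrest.1, List.exists_mem_cons_iff]
          constructor
          · exact Or.inr
          · rintro (⟨h3, _⟩ | h)
            · exact absurd h3 hc3
            · exact h
    have runSpec : ∀ (vs : List Int) (cards : PySem.Dict Int Int),
        DInv cards → (∀ j, cards.getD j 0 = d.getD j 0) → (∀ v ∈ vs, 0 < cards.getD v 0) →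
        (((runLoop f vs cards).1 = true ↔
            ∃ v, v ∈ vs ∧ 0 < d.getD (v+1) 0 ∧ 0 < d.getD (v+2) 0 ∧
              IsDecomp (toMul d - (v ::ₘ (v+1) ::ₘ {v+2})))
         ∧ ((runLoop f vs cards).1 = false →
             DInv (runLoop f vs cards).2 ∧ ∀ j, (runLoop f vs cards).2.getD j 0 = d.getD j 0)) := by
      intro vs
      induction vs with
      | nil =>
        intro cards hci hcf _
        simp only [runLoop]
        exact ⟨by simp, fun _ => ⟨hci, hcf⟩⟩
      | cons v rest IH =>
        intro cards hci hcf hvs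
        have hmcards : toMul cards = toMul d := toMul_eq_of_getD cards d hci.1 hI.1 hcf
        have hv1 : 0 < cards.getD v 0 := hvs v List.mem_cons_self
        by_cases hg : (cards.contains (v+1) && cards.contains (v+2)) = true
        · have hgl := Bool.and_eq_true_iff.mp hg
          have h2 : 0 < cards.getD (v+1) 0 := (contains_iff_pos cards hci _).mp hgl.1
          have h3 : 0 < cards.getD (v+2) 0 := (contains_iff_pos cards hci _).mp hgl.2
          have hd1 : 0 < d.getD v 0 := by rw [← hcf v]; exact hv1
          have hd2 : 0 < d.getD (v+1) 0 := by rw [← hcf (v+1)]; exact h2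
          have hd3 : 0 < d.getD (v+2) 0 := by rw [← hcf (v+2)]; exact h3
          have hIc4 := dinv_runDec cards v hci hv1 h2 h3
          have hm4 : toMul (delIfZero (delIfZero (delIfZero
              (((cards.modify v 0 (· - 1)).modify (v+1) 0 (· - 1)).modify (v+2) 0 (· - 1)) v) (v+1)) (v+2))
              = toMul d - (v ::ₘ (v+1) ::ₘ {v+2}) := by
            rw [toMul_runDec cards v hci hv1 h2 h3, hmcards]
          have hrun_le := run_le_toMul d hI v hd1 hd2 hd3
          have hcard4 : (toMul (delIfZero (delIfZero (delIfZero
              (((cards.modify v 0 (· - 1)).modify (v+1) 0 (· - 1)).modify (v+2) 0 (· - 1)) v) (v+1)) (v+2))).card < f := by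
            rw [hm4, Multiset.card_sub hrun_le]
            have h3le := Multiset.card_le_card hrun_le
            simp only [Multiset.card_cons, Multiset.card_singleton] at h3le ⊢
            omega
          have ihc4 := ih _ hIc4 hcard4
          simp only [runLoop, hg, if_true]
          by_cases hrec : canFormFour f (delIfZero (delIfZero (delIfZero
              (((cards.modify v 0 (· - 1)).modify (v+1) 0 (· - 1)).modify (v+2) 0 (· - 1)) v) (v+1)) (v+2)) = true
          · rw [if_pos hrec]
            constructor
            · constructor
              · intro _
                exact ⟨v, List.mem_cons_self, hd2, hd3, hm4 ▸ ihc4.mp hrec⟩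
              · intro _; rfl
            · intro h; cases h
          · rw [if_neg hrec]
            have hIc5 := dinv_runRestore cards v hci hv1 h2 h3
            have hcf5 : ∀ j, ((((delIfZero (delIfZero (delIfZero
                (((cards.modify v 0 (· - 1)).modify (v+1) 0 (· - 1)).modify (v+2) 0 (· - 1)) v) (v+1)) (v+2)).modify
                  v 0 (· + 1)).modify (v+1) 0 (· + 1)).modify (v+2) 0 (· + 1)).getD j 0 = d.getD j 0 :=
              fun j => (getD_runRestore cards v j).trans (hcf j)
            have IHrest := IH _ hIc5 hcf5 (fun u hu => by
              rw [getD_runRestore]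
              exact hvs u (List.mem_cons_of_mem _ hu))
            refine ⟨?_, IHrest.2⟩
            rw [IHrest.1, List.exists_mem_cons_iff]
            constructor
            · exact Or.inr
            · rintro (⟨_, _, hdec⟩ | h)
              · exact absurd (ihc4.mpr (hm4 ▸ hdec)) hrec
              · exact h
        · simp only [runLoop, if_neg hg]
          have IHrest := IH cards hci hcf (fun u hu => hvs u (List.mem_cons_of_mem _ hu))
          refine ⟨?_, IHrest.2⟩
          rw [IHrest.1, List.exists_mem_cons_iff]
          constructor
          · exact Or.inr
          · rintro (⟨hp2, hp3, _⟩ | h)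
            · exfalso
              apply hg
              rw [Bool.and_eq_true_iff]
              refine ⟨(contains_iff_pos cards hci _).mpr ?_, (contains_iff_pos cards hci _).mpr ?_⟩
              · rw [hcf (v+1)]; exact hp2
              · rw [hcf (v+2)]; exact hp3
            · exact h
    -- assemble
    by_cases hemp : d.items.isEmpty = true
    · have hnil : d.items = [] := List.isEmpty_iff.mp hemp
      have hm0 : toMul d = 0 := by rw [toMul, hnil]; rfl
      simp only [canFormFour, hemp, if_true]
      exact ⟨fun _ => hm0 ▸ isDecomp_zero, fun _ => trivial⟩
    · have hne : d.items ≠ [] := fun h => hemp (by rw [h]; rfl)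
      have hm0 : toMul d ≠ 0 := toMul_nonzero d hI hne
      have hTS := tripleSpec d.items d hI (fun _ => rfl)
        (fun p hp => PySem.Dict.getD_of_mem_items d hp hI.1 0)
      simp only [canFormFour, hemp, if_false, Bool.false_eq_true]
      by_cases hres : (tripleLoop f d.items d).1 = true
      · simp only [hres, if_true]
        constructor
        · intro _
          obtain ⟨p, hp, h3p, hdec⟩ := hTS.1.mp hres
          have hgd : d.getD p.1 0 = p.2 := PySem.Dict.getD_of_mem_items d hp hI.1 0
          exact isDecomp_of_le_of_sub (replicate_le_toMul d hI p.1 3 (by omega))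
            (isDecomp_triple_single p.1) hdec
        · intro _; trivial
      · have hres' : (tripleLoop f d.items d).1 = false := by
          cases h : (tripleLoop f d.items d).1
          · rfl
          · exact absurd h hres
        obtain ⟨hIc1, hcfc⟩ := hTS.2 hres'
        simp only [hres', if_false, Bool.false_eq_true]
        have hndk : (PySem.List.sorted (tripleLoop f d.items d).2.keys (fun x => x) false).Nodup :=
          ((PySem.List.sorted_perm ((tripleLoop f d.items d).2.keys) (fun x => x) false).symm).nodup hIc1.1
        have hpw : (PySem.List.sorted (tripleLoop f d.items d).2.keys (fun x => x) false).Pairwise (· < ·) :=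
          pairwise_lt_of_sorted_nodup _ (PySem.List.sorted_pairwise _ _) hndk
        have hRS := runSpec ((PySem.List.sorted (tripleLoop f d.items d).2.keys (fun x => x) false).take
            ((PySem.List.sorted (tripleLoop f d.items d).2.keys (fun x => x) false).length - 2))
          (tripleLoop f d.items d).2 hIc1 hcfc
          (fun u hu => hIc1.2 u ((PySem.List.mem_sorted _ _ _ _).mp (List.mem_of_mem_take hu)))
        rw [hRS.1]
        constructor
        · rintro ⟨u, hu, hp2, hp3, hdec⟩
          have hp1 : 0 < d.getD u 0 := by
            rw [← hcfc u]
            exact hIc1.2 u ((PySem.List.mem_sorted _ _ _ _).mp (List.mem_of_mem_take hu))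
          exact isDecomp_of_le_of_sub (run_le_toMul d hI u hp1 hp2 hp3)
            (isDecomp_run_single u) hdec
        · intro hdec
          rcases isDecomp_inversion (toMul d) hm0 hdec with ⟨u, hcnt, hdec'⟩ | ⟨u, hu1, hu2, hu3, hdec'⟩
          · exfalso
            apply hres
            apply hTS.1.mpr
            have hgd : 3 ≤ d.getD u 0 := by
              have := count_toMul d hI.1 u
              omega
            have hkey : u ∈ d.keys := mem_keys_of_getD_ne d u (by omega)
            refine ⟨(u, d.getD u 0), ?_, hgd, hdec'⟩
            rw [PySem.Dict.items_eq_map_keys d hI.1 0]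
            exact List.mem_map_of_mem hkey
          · have hp1 : 0 < d.getD u 0 := (mem_toMul_iff d hI.1 u).mp hu1
            have hp2 : 0 < d.getD (u+1) 0 := (mem_toMul_iff d hI.1 (u+1)).mp hu2
            have hp3 : 0 < d.getD (u+2) 0 := (mem_toMul_iff d hI.1 (u+2)).mp hu3
            have hks : ∀ w : Int, 0 < d.getD w 0 →
                w ∈ PySem.List.sorted (tripleLoop f d.items d).2.keys (fun x => x) false := by
              intro w hw
              rw [PySem.List.mem_sorted]
              exact mem_keys_of_getD_ne _ w (by rw [hcfc w]; omega)
            have htake := mem_take_of_sorted _ hpw u (hks u hp1) (hks (u+1) hp2) (hks (u+2) hp3)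
            exact ⟨u, htake, hp2, hp3, hdec'⟩
theorem pairLoop_spec (fuel : Nat) (m : Multiset Int) (hm : m.card < fuel + 2) :
    ∀ (items : List (Int × Int)) (cnt : PySem.Dict Int Int), DInv cnt → toMul cnt = m →
    (∀ p ∈ items, cnt.getD p.1 0 = p.2) →
    (pairLoop fuel items cnt = true ↔
      ∃ p, p ∈ items ∧ 2 ≤ p.2 ∧ IsDecomp (m - Multiset.replicate 2 p.1)) := by
  intro items
  induction items with
  | nil =>
    intro cnt hI hm0 _
    simp only [pairLoop]
    simp
  | cons hd rest IH =>
    intro cnt hI hmm hit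
    obtain ⟨card, count⟩ := hd
    by_cases hc2 : 2 ≤ count
    · have hcv : cnt.getD card 0 = count := hit (card, count) List.mem_cons_self
      have hIc1 : DInv (delIfZero (cnt.modify card 0 (fun c => c - 2)) card) :=
        dinv_subDel cnt card 2 hI (by omega)
      have hrep_le : Multiset.replicate 2 card ≤ m := by
        rw [← hmm]
        exact replicate_le_toMul cnt hI card 2 (by omega)
      have hm1 : toMul (delIfZero (cnt.modify card 0 (fun c => c - 2)) card)
          = m - Multiset.replicate 2 card := by
        rw [toMul_subDel cnt card 2 hI (by omega) (by omega), hmm]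
        rfl
      have hcard1 : (toMul (delIfZero (cnt.modify card 0 (fun c => c - 2)) card)).card < fuel := by
        rw [hm1, Multiset.card_sub hrep_le]
        have h2le := Multiset.card_le_card hrep_le
        simp only [Multiset.card_replicate] at h2le ⊢
        omega
      have ihc1 := canFF_spec fuel _ hIc1 hcard1
      simp only [pairLoop, if_pos hc2]
      by_cases hrec : canFormFour fuel (delIfZero (cnt.modify card 0 (fun c => c - 2)) card) = true
      · rw [if_pos hrec]
        constructor
        · intro _
          exact ⟨(card, count), List.mem_cons_self, hc2, hm1 ▸ ihc1.mp hrec⟩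
        · intro _; rfl
      · rw [if_neg hrec]
        have hcfr : ∀ j, ((delIfZero (cnt.modify card 0 (fun c => c - 2)) card).modify card 0
            (fun c => c + 2)).getD j 0 = cnt.getD j 0 := by
          intro j
          rw [PySem.Dict.getD_modify]
          by_cases h : j = card
          · rw [if_pos h, getD_subDel, if_pos rfl, h]
            omega
          · rw [if_neg h, getD_subDel, if_neg h]
        have hIr : DInv ((delIfZero (cnt.modify card 0 (fun c => c - 2)) card).modify card 0
            (fun c => c + 2)) := by
          refine ⟨nodup_keys_modify _ _ _ hIc1.1, ?_⟩
          intro k hk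
          rw [hcfr k]
          rcases (mem_keys_modify _ _ _ _).mp hk with h | h
          · subst h; omega
          · have := hIc1.2 k h
            rw [getD_subDel] at this
            split_ifs at this with hkc
            · subst hkc; omega
            · exact this
        have hmr : toMul ((delIfZero (cnt.modify card 0 (fun c => c - 2)) card).modify card 0
            (fun c => c + 2)) = m := by
          rw [← hmm]
          exact toMul_eq_of_getD _ _ hIr.1 hI.1 hcfr
        have IHrest := IH _ hIr hmr (fun p hp => by
          rw [hcfr p.1]
          exact hit p (List.mem_cons_of_mem _ hp))
        rw [IHrest, List.exists_mem_cons_iff]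
        constructor
        · exact Or.inr
        · rintro (⟨_, hdec⟩ | h)
          · exact absurd (ihc1.mpr (hm1 ▸ hdec)) hrec
          · exact h
    · simp only [pairLoop, if_neg hc2]
      have IHrest := IH cnt hI hmm (fun p hp => hit p (List.mem_cons_of_mem _ hp))
      rw [IHrest, List.exists_mem_cons_iff]
      constructor
      · exact Or.inr
      · rintro (⟨h2, _⟩ | h)
        · exact absurd h2 hc2
        · exact h

-- ===== B-side =====
theorem meldsGo_spec : ∀ (vs : List Int) (cnt : PySem.Dict Int Int),
    cnt.keys.Nodup → (∀ j : Int, 0 ≤ cnt.getD j 0) → vs.Pairwise (· < ·) →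
    (∀ k : Int, 0 < cnt.getD k 0 → k ∈ vs) →
    (meldsGo vs cnt = true ↔ IsDecomp (toMul cnt)) := by
  intro vs
  induction vs with
  | nil =>
    intro cnt hnd hnn _ hsupp
    have hm0 : toMul cnt = 0 := by
      ext x
      rw [count_toMul cnt hnd x]
      have := hnn x
      have h0 : cnt.getD x 0 ≤ 0 := by
        by_contra hpos
        exact absurd (hsupp x (by omega)) (List.not_mem_nil)
      simp
      omega
    rw [hm0]
    simp only [meldsGo]
    exact ⟨fun _ => isDecomp_zero, fun _ => by trivial⟩
  | cons v rest IH =>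
    intro cnt hnd hnn hpw hsupp
    simp only [meldsGo]
    by_cases hc0 : (cnt.getD v 0 == 0) = true
    · rw [if_pos hc0]
      simp only [beq_iff_eq] at hc0
      exact IH cnt hnd hnn hpw.of_cons (fun k hk => by
        rcases List.mem_cons.mp (hsupp k hk) with h | h
        · subst h; omega
        · exact h)
    · rw [if_neg hc0]
      simp only [beq_iff_eq] at hc0
      have hcpos : 0 < cnt.getD v 0 := lt_of_le_of_ne (hnn v) (Ne.symm hc0)
      have hmod : PySem.Int.mod (cnt.getD v 0) 3 = (cnt.getD v 0) % 3 :=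
        PySem.Int.mod_eq_emod_of_pos (by omega)
      set m := toMul cnt with hmdef
      have hvm : v ∈ m := by
        rw [hmdef, mem_toMul_iff cnt hnd v]
        exact hcpos
      have hmin : ∀ x ∈ m, v ≤ x := by
        intro x hx
        have hpos : 0 < cnt.getD x 0 := (mem_toMul_iff cnt hnd x).mp hx
        rcases List.mem_cons.mp (hsupp x hpos) with h | h
        · omega
        · exact le_of_lt (List.rel_of_pairwise_cons hpw h)
      have hdm := decomp_min m v hvm hmin
      have hcntv : m.count v = (cnt.getD v 0).toNat := count_toMul cnt hnd v
      have hcnt1 : m.count (v+1) = (cnt.getD (v+1) 0).toNat := count_toMul cnt hnd (v+1)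
      have hcnt2 : m.count (v+2) = (cnt.getD (v+2) 0).toNat := count_toMul cnt hnd (v+2)
      by_cases hr0 : (PySem.Int.mod (cnt.getD v 0) 3 != 0) = true
      · rw [if_pos hr0]
        simp only [bne_iff_ne] at hr0
        by_cases hguard : (decide (cnt.getD (v+1) 0 < PySem.Int.mod (cnt.getD v 0) 3)
            || decide (cnt.getD (v+2) 0 < PySem.Int.mod (cnt.getD v 0) 3)) = true
        · rw [if_pos hguard]
          constructor
          · intro h; cases h
          · intro hdec
            rcases Bool.or_eq_true_iff.mp hguard with hlt | hlt <;>
              rw [decide_eq_true_eq] at hlt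
            · have := (hdm.mp hdec).1
              have hnn1 := hnn (v+1)
              omega
            · have := (hdm.mp hdec).2.1
              have hnn2 := hnn (v+2)
              omega
        · rw [if_neg hguard]
          have hge1 : ¬ (cnt.getD (v+1) 0 < PySem.Int.mod (cnt.getD v 0) 3) := by
            intro hlt
            apply hguard
            rw [Bool.or_eq_true_iff, decide_eq_true_eq, decide_eq_true_eq]
            exact Or.inl hlt
          have hge2 : ¬ (cnt.getD (v+2) 0 < PySem.Int.mod (cnt.getD v 0) 3) := by
            intro hlt
            apply hguard
            rw [Bool.or_eq_true_iff, decide_eq_true_eq, decide_eq_true_eq]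
            exact Or.inr hlt
          set cnt2 := (((cnt.modify (v+1) 0 (· - PySem.Int.mod (cnt.getD v 0) 3)).modify (v+2) 0
              (· - PySem.Int.mod (cnt.getD v 0) 3)).insert v 0) with hcnt2def
          have hgd2 : ∀ j, cnt2.getD j 0 =
              if j = v then 0
              else if j = v+1 then cnt.getD (v+1) 0 - PySem.Int.mod (cnt.getD v 0) 3
              else if j = v+2 then cnt.getD (v+2) 0 - PySem.Int.mod (cnt.getD v 0) 3
              else cnt.getD j 0 := by
            intro j
            rw [hcnt2def]
            simp only [PySem.Dict.getD_insert, PySem.Dict.getD_modify]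
            by_cases e1 : j = v
            · rw [e1]; split_ifs <;> omega
            · by_cases e2 : j = v+1
              · rw [e2]; split_ifs <;> omega
              · by_cases e3 : j = v+2
                · rw [e3]; split_ifs <;> omega
                · split_ifs <;> omega
          have hnd2 : cnt2.keys.Nodup := by
            rw [hcnt2def]
            exact PySem.Dict.nodup_keys_insert _ _ _ (nodup_keys_modify _ _ _ (nodup_keys_modify _ _ _ hnd))
          have hnn2 : ∀ j : Int, 0 ≤ cnt2.getD j 0 := by
            intro j
            rw [hgd2 j]
            have := hnn j
            split_ifs <;> omega
          have hsupp2 : ∀ k : Int, 0 < cnt2.getD k 0 → k ∈ rest := by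
            intro k hk
            rw [hgd2 k] at hk
            split_ifs at hk with e1 e2 e3
            · omega
            · rcases List.mem_cons.mp (hsupp k (by rw [e2]; omega)) with h | h
              · exact absurd h (by omega)
              · exact h
            · rcases List.mem_cons.mp (hsupp k (by rw [e3]; omega)) with h | h
              · exact absurd h (by omega)
              · exact h
            · rcases List.mem_cons.mp (hsupp k hk) with h | h
              · exact absurd h e1
              · exact h
          have hm2 : toMul cnt2 = m - (Multiset.replicate (m.count v) v
              + Multiset.replicate (m.count v % 3) (v+1) + Multiset.replicate (m.count v % 3) (v+2)) := by
            ext x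
            rw [count_toMul cnt2 hnd2 x, hgd2 x, Multiset.count_sub]
            simp only [Multiset.count_add, Multiset.count_replicate]
            have hx : m.count x = (cnt.getD x 0).toNat := count_toMul cnt hnd x
            by_cases e1 : x = v
            · rw [e1] at hx ⊢; split_ifs <;> omega
            · by_cases e2 : x = v+1
              · rw [e2] at hx ⊢; split_ifs <;> omega
              · by_cases e3 : x = v+2
                · rw [e3] at hx ⊢; split_ifs <;> omega
                · split_ifs <;> omega
          have IH2 := IH cnt2 hnd2 hnn2 hpw.of_cons hsupp2
          rw [IH2, hm2, hdm]
          constructor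
          · intro h
            refine ⟨?_, ?_, h⟩ <;> omega
          · rintro ⟨_, _, h⟩
            exact h
      · rw [if_neg hr0]
        simp only [bne_iff_ne, not_not] at hr0
        set cnt2 := cnt.insert v 0 with hcnt2def
        have hgd2 : ∀ j, cnt2.getD j 0 = if j = v then 0 else cnt.getD j 0 := by
          intro j
          rw [hcnt2def, PySem.Dict.getD_insert]
        have hnd2 : cnt2.keys.Nodup := PySem.Dict.nodup_keys_insert _ _ _ hnd
        have hnn2 : ∀ j : Int, 0 ≤ cnt2.getD j 0 := by
          intro j
          rw [hgd2 j]
          have := hnn j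
          split_ifs <;> omega
        have hsupp2 : ∀ k : Int, 0 < cnt2.getD k 0 → k ∈ rest := by
          intro k hk
          rw [hgd2 k] at hk
          split_ifs at hk with e1
          · omega
          · rcases List.mem_cons.mp (hsupp k (by omega)) with h | h
            · exact absurd h e1
            · exact h
        have hrq : m.count v % 3 = 0 := by omega
        have hm2 : toMul cnt2 = m - (Multiset.replicate (m.count v) v
            + Multiset.replicate (m.count v % 3) (v+1) + Multiset.replicate (m.count v % 3) (v+2)) := by
          rw [hrq]
          simp only [Multiset.replicate_zero, add_zero]
          ext x
          rw [count_toMul cnt2 hnd2 x, hgd2 x, Multiset.count_sub, Multiset.count_replicate]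
          have hx : m.count x = (cnt.getD x 0).toNat := count_toMul cnt hnd x
          by_cases e1 : x = v
          · rw [e1] at hx ⊢; split_ifs <;> omega
          · split_ifs <;> omega
        have IH2 := IH cnt2 hnd2 hnn2 hpw.of_cons hsupp2
        rw [IH2, hm2, hdm]
        constructor
        · intro h
          refine ⟨?_, ?_, h⟩ <;> omega
        · rintro ⟨_, _, h⟩
          exact h

theorem pairLoopB_spec (m : Multiset Int) :
    ∀ (ks : List Int) (cnt : PySem.Dict Int Int), DInv cnt → toMul cnt = m →
    (pairLoopB ks cnt = true ↔
      ∃ p, p ∈ ks ∧ 2 ≤ cnt.getD p 0 ∧ IsDecomp (m - Multiset.replicate 2 p)) := by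
  intro ks
  induction ks with
  | nil =>
    intro cnt hI hmm
    simp only [pairLoopB]
    simp
  | cons p rest IH =>
    intro cnt hI hmm
    simp only [pairLoopB]
    by_cases hp2 : 2 ≤ cnt.getD p 0
    · rw [if_pos hp2]
      have hIc : DInv (delIfZero (cnt.modify p 0 (· - 2)) p) :=
        dinv_subDel cnt p 2 hI (by omega)
      have hmc : toMul (delIfZero (cnt.modify p 0 (· - 2)) p) = m - Multiset.replicate 2 p := by
        rw [toMul_subDel cnt p 2 hI (by omega) (by omega), hmm]
        rfl
      have hmelds : melds (delIfZero (cnt.modify p 0 (· - 2)) p) = true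
          ↔ IsDecomp (m - Multiset.replicate 2 p) := by
        rw [melds, ← hmc]
        have hndk : (PySem.List.sorted (delIfZero (cnt.modify p 0 (· - 2)) p).keys (fun x => x) false).Nodup :=
          ((PySem.List.sorted_perm ((delIfZero (cnt.modify p 0 (· - 2)) p).keys) (fun x => x) false).symm).nodup hIc.1
        exact meldsGo_spec _ _ hIc.1 (getD_nonneg _ hIc)
          (pairwise_lt_of_sorted_nodup _ (PySem.List.sorted_pairwise _ _) hndk)
          (fun k hk => (PySem.List.mem_sorted _ _ _ _).mpr (mem_keys_of_getD_ne _ k (by omega)))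
      by_cases hmel : melds (delIfZero (cnt.modify p 0 (· - 2)) p) = true
      · rw [if_pos hmel]
        constructor
        · intro _
          exact ⟨p, List.mem_cons_self, hp2, hmelds.mp hmel⟩
        · intro _; rfl
      · rw [if_neg hmel]
        rw [IH cnt hI hmm, List.exists_mem_cons_iff]
        constructor
        · exact Or.inr
        · rintro (⟨_, hdec⟩ | h)
          · exact absurd (hmelds.mpr hdec) hmel
          · exact h
    · rw [if_neg hp2]
      rw [IH cnt hI hmm, List.exists_mem_cons_iff]
      constructor
      · exact Or.inr
      · rintro (⟨h2, _⟩ | h)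
        · exact absurd h2 hp2
        · exact h

theorem counter_dinv (cards : List Int) : DInv (PySem.Dict.counter cards) := by
  refine ⟨PySem.Dict.nodup_keys_counter cards, ?_⟩
  intro k hk
  rw [PySem.Dict.getD_counter]
  have : k ∈ cards := by
    have := PySem.Dict.keys_counter cards
    rw [this] at hk
    exact (PySem.Set.mem_ofList _ _).mp hk
  have := List.count_pos_iff.mpr this
  omega

-- ===== VERDICT (by name: the statement is the Claim_ definition above) =====
theorem ifhu_spec : Claim_equal_ifhu := by
  intro cards _
  show ifhu cards = ifhu_alt cards
  have hI := counter_dinv cards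
  have hmc : toMul (PySem.Dict.counter cards) = (cards : Multiset Int) := toMul_counter cards
  have hcardlt : ((cards : Multiset Int)).card < (cards.length + 1) + 2 := by
    simp
    omega
  have hA := pairLoop_spec (cards.length + 1) (cards : Multiset Int) hcardlt
    (PySem.Dict.counter cards).items (PySem.Dict.counter cards) hI hmc
    (fun p hp => PySem.Dict.getD_of_mem_items _ hp hI.1 0)
  have hB := pairLoopB_spec (cards : Multiset Int) (PySem.Dict.counter cards).keys
    (PySem.Dict.counter cards) hI hmc
  apply Bool.coe_iff_coe.mp
  rw [ifhu, ifhu_alt]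
  rw [hA, hB]
  constructor
  · rintro ⟨p, hp, h2, hdec⟩
    have hgd : (PySem.Dict.counter cards).getD p.1 0 = p.2 :=
      PySem.Dict.getD_of_mem_items _ hp hI.1 0
    exact ⟨p.1, List.mem_map_of_mem (f := Prod.fst) hp, by omega, hdec⟩
  · rintro ⟨k, hk, h2, hdec⟩
    refine ⟨(k, (PySem.Dict.counter cards).getD k 0), ?_, h2, hdec⟩
    rw [PySem.Dict.items_eq_map_keys _ hI.1 0]
    exact List.mem_map_of_mem hk
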